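-- pv_equiv track=rewrite | github.com/The-Artificer-of-Ciphers-LLC/sentinel-of-mnemosyne | sentinel-core/app/services/message_processing.py | _best_search_query
-- ===== SOURCE A (Python) =====
-- _SEARCH_STOPWORDS = frozenset(
--     "a about all also an and any are as at be been by can could "
--     "did do does for from get go had has have he her here his how "
--     "i if in is it its just let may me might more my no not of or "
--     "our out see she should so some than that the their then there "
--     "they this to up us was we were what when where which who will "
--     "with would you your".split()
-- )
--
-- def _best_search_query(content: str) -> str:
--     """Extract the longest run of consecutive non-stopword words from content.
--
--     Obsidian /search/simple/ is conjunctive: every term must appear in the result.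
--     A run of adjacent content words (e.g. "omie wise synthwave" from "what do you
--     know about the omie wise synthwave") forms a specific AND-query that matches the
--     target note without admitting generic matches from single function words.
--     Falls back to the full content string if no run is found.
--     """
--     words = content.lower().split()
--     tokens = [w.strip(".,!?;:\"'") for w in words]
--     indexed = [(i, t) for i, t in enumerate(tokens) if t and t not in _SEARCH_STOPWORDS]
--     if not indexed:
--         return content
--     runs: list[list[tuple[int, str]]] = []
--     current: list[tuple[int, str]] = [indexed[0]]
--     for prev, curr in zip(indexed, indexed[1:]):
--         if curr[0] == prev[0] + 1:
--             current.append(curr)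
--         else:
--             runs.append(current)
--             current = [curr]
--     runs.append(current)
--     best = max(runs, key=len)
--     return " ".join(t for _, t in best)
-- ===== SOURCE B (Python) =====
-- _SEARCH_STOPWORDS = frozenset(
--     "a about all also an and any are as at be been by can could "
--     "did do does for from get go had has have he her here his how "
--     "i if in is it its just let may me might more my no not of or "
--     "our out see she should so some than that the their then there "
--     "they this to up us was we were what when where which who will "
--     "with would you your".split()
-- )
--
--
-- def _best_search_query(content: str) -> str:
--     """Single streaming pass: keep the first longest run of consecutive
--     non-stopword tokens; fall back to the full content if none."""
--     best: list[str] = []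
--     current: list[str] = []
--     for w in content.lower().split():
--         t = w.strip(".,!?;:\"'")
--         if t and t not in _SEARCH_STOPWORDS:
--             current.append(t)
--         else:
--             if len(current) > len(best):
--                 best = current
--             current = []
--     if len(current) > len(best):
--         best = current
--     return " ".join(best) if best else content
-- ===== Notes on version B (the rewrite author's own statement) =====
-- stated objective: simpler
-- what changed: Replaces the four-phase pipeline (enumerate+filter to indexed pairs, zip-adjacent grouping into an explicit list of runs, max(key=len), join) by one streaming pass over the stripped tokens that maintains only the current run and the best run seen so far, breaking runs on empty/stopword tokens and keeping the first longest run via a strict comparison.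
import Mathlib
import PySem

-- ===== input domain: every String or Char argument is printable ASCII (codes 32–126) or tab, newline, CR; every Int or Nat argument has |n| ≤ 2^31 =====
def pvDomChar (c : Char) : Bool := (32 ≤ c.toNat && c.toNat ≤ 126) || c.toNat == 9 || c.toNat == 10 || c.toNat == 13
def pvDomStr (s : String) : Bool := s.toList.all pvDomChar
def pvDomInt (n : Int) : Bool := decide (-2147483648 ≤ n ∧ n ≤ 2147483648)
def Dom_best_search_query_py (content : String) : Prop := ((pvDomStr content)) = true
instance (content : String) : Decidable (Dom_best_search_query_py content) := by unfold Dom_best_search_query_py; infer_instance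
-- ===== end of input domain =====

-- B replaces A's enumerate/zip-grouping/max(key=len) pipeline by one streaming pass
-- keeping only the current and best run; objective: simpler.

-- ===== PORT A =====
def pvStopwords : List String :=
  ["a","about","all","also","an","and","any","are","as","at","be","been","by","can","could",
   "did","do","does","for","from","get","go","had","has","have","he","her","here","his","how",
   "i","if","in","is","it","its","just","let","may","me","might","more","my","no","not","of","or",
   "our","out","see","she","should","so","some","than","that","the","their","then","there",
   "they","this","to","up","us","was","we","were","what","when","where","which","who","will",
   "with","would","you","your"]

-- 't and t not in _SEARCH_STOPWORDS' (truthiness of a string = nonempty)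
def pvKeep (t : String) : Bool := t != "" && !(pvStopwords.contains t)

def best_search_query_py (content : String) : String :=
  let words := PySem.Str.split₀ (PySem.Str.lower content)
  let tokens := words.map (fun w => PySem.Str.stripChars w ".,!?;:\"'")
  let indexed := (PySem.List.enumerate tokens).filter (fun p => pvKeep p.2)
  match indexed with
  | [] => content
  | first :: rest =>
    -- for prev, curr in zip(indexed, indexed[1:]): …
    let st := ((first :: rest).zip rest).foldl
      (fun (st : List (List (Int × String)) × List (Int × String)) pc =>
        if pc.2.1 == pc.1.1 + 1 then (st.1, st.2 ++ [pc.2])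
        else (st.1 ++ [st.2], [pc.2]))
      ([], [first])
    let runs := st.1 ++ [st.2]
    -- max(runs, key=len): first run of maximal length
    let best := match runs with
      | [] => []  -- unreachable: runs = st.1 ++ [st.2]
      | r :: rs => rs.foldl (fun b (x : List (Int × String)) => if x.length > b.length then x else b) r
    PySem.Str.join " " (best.map Prod.snd)

-- ===== PORT B =====
def best_search_query_py_alt (content : String) : String :=
  let tokens := (PySem.Str.split₀ (PySem.Str.lower content)).map
    (fun w => PySem.Str.stripChars w ".,!?;:\"'")
  let st := tokens.foldl
    (fun (st : List String × List String) t =>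
      if pvKeep t then (st.1, st.2 ++ [t])
      else ((if st.2.length > st.1.length then st.2 else st.1), []))
    ([], [])
  let best := if st.2.length > st.1.length then st.2 else st.1
  if best = [] then content else PySem.Str.join " " best

-- ===== PRECONDITION & SPEC =====
def Spec_best_search_query_py (content : String) (out : String) : Prop := out = best_search_query_py_alt content
instance (content : String) (out : String) : Decidable (Spec_best_search_query_py content out) := by unfold Spec_best_search_query_py; infer_instance

-- ===== CLAIM (what is proved, stated in full; the proofs are below) =====
def Claim_equal_best_search_query_py : Prop := ∀ (content : String), Dom_best_search_query_py content → Spec_best_search_query_py content (best_search_query_py content)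

-- ===== LEMMAS AND PROOFS =====

-- A's run-grouping as a structural recursion (prev = last element appended)
def pvGaAux (runs : List (List (Int × String))) (cur : List (Int × String))
    (prev : Int × String) : List (Int × String) → List (List (Int × String))
  | [] => runs ++ [cur]
  | q :: qs =>
    if q.1 == prev.1 + 1 then pvGaAux runs (cur ++ [q]) q qs
    else pvGaAux (runs ++ [cur]) [q] q qs

def pvGa0 : List (Int × String) → List (List (Int × String))
  | [] => []
  | p :: ps => pvGaAux [] [p] p ps

-- reference: maximal blocks of kept tokens
def pvBlocksAux (cur : List String) : List String → List (List String)
  | [] => if cur = [] then [] else [cur]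
  | t :: ts =>
    if pvKeep t then pvBlocksAux (cur ++ [t]) ts
    else if cur = [] then pvBlocksAux [] ts else cur :: pvBlocksAux [] ts

def pvFilt (n : Int) (ts : List String) : List (Int × String) :=
  (PySem.List.enumerate ts n).filter (fun p => pvKeep p.2)

def pvPick (b x : List String) : List String := if x.length > b.length then x else b

theorem pvFoldl_zip_ga (ys : List (Int × String)) :
    ∀ (x : Int × String) (runs : List (List (Int × String))) (cur : List (Int × String)),
    (let st := ((x :: ys).zip ys).foldl
        (fun (st : List (List (Int × String)) × List (Int × String)) pc =>
          if pc.2.1 == pc.1.1 + 1 then (st.1, st.2 ++ [pc.2])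
          else (st.1 ++ [st.2], [pc.2]))
        (runs, cur);
      st.1 ++ [st.2]) = pvGaAux runs cur x ys := by
  induction ys with
  | nil => intro x runs cur; simp [pvGaAux]
  | cons y ys ih =>
    intro x runs cur
    simp only [List.zip_cons_cons, List.foldl_cons, pvGaAux]
    by_cases h : (y.1 == x.1 + 1) = true
    · rw [if_pos h, if_pos h]; exact ih y runs (cur ++ [y])
    · rw [if_neg h, if_neg h]; exact ih y (runs ++ [cur]) [y]

theorem pvEnumerate_cons (n : Int) (t : String) (ts : List String) :
    PySem.List.enumerate (t :: ts) n = (n, t) :: PySem.List.enumerate ts (n + 1) := by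
  simp [PySem.List.enumerate]

theorem pvFilt_nil (n : Int) : pvFilt n [] = [] := by
  simp [pvFilt, PySem.List.enumerate]

theorem pvFilt_cons (n : Int) (t : String) (ts : List String) :
    pvFilt n (t :: ts) =
      if pvKeep t then (n, t) :: pvFilt (n + 1) ts else pvFilt (n + 1) ts := by
  simp only [pvFilt, pvEnumerate_cons, List.filter_cons]

-- open/closed state lemma relating A's grouping on the filtered stream to blocks
theorem pvGaAux_blocks (ts : List String) :
    ∀ (n : Int) (runs : List (List (Int × String))) (cur : List (Int × String))
      (prev : Int × String), cur ≠ [] → prev.1 + 1 ≤ n →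
    (pvGaAux runs cur prev (pvFilt n ts)).map (List.map Prod.snd) =
      if prev.1 + 1 = n then
        runs.map (List.map Prod.snd) ++ pvBlocksAux (cur.map Prod.snd) ts
      else
        runs.map (List.map Prod.snd) ++ [cur.map Prod.snd] ++ pvBlocksAux [] ts := by
  induction ts with
  | nil =>
    intro n runs cur prev hc hn
    rw [pvFilt_nil]
    simp only [pvGaAux, pvBlocksAux, List.map_append, List.map_cons, List.map_nil]
    split
    · simp [List.map_eq_nil_iff, hc]
    · simp
  | cons t ts ih =>
    intro n runs cur prev hc hn
    rw [pvFilt_cons]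
    by_cases hk : pvKeep t
    · rw [if_pos hk]
      by_cases ha : prev.1 + 1 = n
      · have hcond : (((n, t) : Int × String).1 == prev.1 + 1) = true := by
          simp [ha]
        simp only [pvGaAux, hcond, if_pos]
        rw [ih (n + 1) runs (cur ++ [(n, t)]) (n, t) (by simp) (by omega)]
        simp [ha, pvBlocksAux, hk]
      · have hcond : ¬ ((((n, t) : Int × String).1 == prev.1 + 1) = true) := by
          simp; omega
        rw [pvGaAux, if_neg hcond]
        rw [ih (n + 1) (runs ++ [cur]) [(n, t)] (n, t) (by simp) (by omega)]
        simp [ha, pvBlocksAux, hk]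
    · rw [if_neg hk]
      rw [ih (n + 1) runs cur prev hc (by omega)]
      have hne : prev.1 + 1 ≠ n + 1 := by omega
      by_cases ha : prev.1 + 1 = n
      · simp only [ha, if_pos] at *
        simp [hne, pvBlocksAux, hk, List.map_eq_nil_iff, hc]
      · simp [ha, hne, pvBlocksAux, hk]

theorem pvGa0_blocks (ts : List String) (n : Int) :
    (pvGa0 (pvFilt n ts)).map (List.map Prod.snd) = pvBlocksAux [] ts := by
  induction ts generalizing n with
  | nil => rw [pvFilt_nil]; simp [pvGa0, pvBlocksAux]
  | cons t ts ih =>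
    rw [pvFilt_cons]
    by_cases hk : pvKeep t
    · rw [if_pos hk]
      show (pvGaAux [] [(n, t)] (n, t) (pvFilt (n + 1) ts)).map (List.map Prod.snd) = _
      rw [pvGaAux_blocks ts (n + 1) [] [(n, t)] (n, t) (by simp) (by omega)]
      simp [pvBlocksAux, hk]
    · rw [if_neg hk, ih (n + 1)]
      simp [pvBlocksAux, hk]

-- B's fold computes the streaming first-max over blocks
theorem pvBfold_blocks (ts : List String) :
    ∀ (best cur : List String),
    (let st := ts.foldl
        (fun (st : List String × List String) t =>
          if pvKeep t then (st.1, st.2 ++ [t])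
          else ((if st.2.length > st.1.length then st.2 else st.1), []))
        (best, cur);
      if st.2.length > st.1.length then st.2 else st.1) =
      (pvBlocksAux cur ts).foldl pvPick best := by
  induction ts with
  | nil =>
    intro best cur
    simp only [List.foldl_nil, pvBlocksAux]
    by_cases hc : cur = []
    · simp [hc]
    · simp [hc, pvPick]
  | cons t ts ih =>
    intro best cur
    simp only [List.foldl_cons, pvBlocksAux]
    by_cases hk : pvKeep t
    · simp only [hk, if_pos]
      exact ih best (cur ++ [t])
    · simp only [hk, Bool.false_eq_true, if_false]
      by_cases hc : cur = []
      · simp only [hc, if_pos]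
        have : pvPick best ([] : List String) = best := by simp [pvPick]
        simpa [hc] using ih best []
      · simp only [hc]
        simpa [pvPick] using ih (if cur.length > best.length then cur else best) []

theorem pvBlocksAux_ne_nil (ts : List String) :
    ∀ (cur b : List String), b ∈ pvBlocksAux cur ts → b ≠ [] := by
  induction ts with
  | nil =>
    intro cur b hb
    simp only [pvBlocksAux] at hb
    split at hb
    · simp at hb
    · rename_i hc
      simp at hb
      simpa [hb] using hc
  | cons t ts ih =>
    intro cur b hb
    simp only [pvBlocksAux] at hb
    split at hb
    · exact ih (cur ++ [t]) b hb
    · split at hb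
      · exact ih [] b hb
      · rename_i hc
        rcases List.mem_cons.mp hb with h | h
        · simpa [h] using hc
        · exact ih [] b h

theorem pvFoldl_pick_length (bs : List (List String)) :
    ∀ b, b.length ≤ (bs.foldl pvPick b).length := by
  induction bs with
  | nil => simp
  | cons x xs ih =>
    intro b
    refine le_trans ?_ (ih (pvPick b x))
    simp only [pvPick]; split <;> omega

theorem pvMap_foldl_pick (bs : List (List (Int × String))) :
    ∀ (b : List (Int × String)),
    (bs.foldl (fun b (x : List (Int × String)) => if x.length > b.length then x else b) b).map Prod.snd =
      (bs.map (List.map Prod.snd)).foldl pvPick (b.map Prod.snd) := by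
  induction bs with
  | nil => simp
  | cons x xs ih =>
    intro b
    simp only [List.foldl_cons, List.map_cons, ih, pvPick, List.length_map]
    split <;> simp

def pvAFold (first : Int × String) (rest : List (Int × String)) :
    List (List (Int × String)) × List (Int × String) :=
  ((first :: rest).zip rest).foldl
    (fun st pc =>
      if pc.2.1 == pc.1.1 + 1 then (st.1, st.2 ++ [pc.2])
      else (st.1 ++ [st.2], [pc.2]))
    ([], [first])

def pvBFold (ts : List String) : List String × List String :=
  ts.foldl
    (fun st t =>
      if pvKeep t then (st.1, st.2 ++ [t])
      else ((if st.2.length > st.1.length then st.2 else st.1), []))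
    ([], [])

theorem pvCore (content : String) (ts : List String) :
    (match pvFilt 0 ts with
     | [] => content
     | first :: rest =>
        PySem.Str.join " "
          ((match (pvAFold first rest).1 ++ [(pvAFold first rest).2] with
            | [] => []
            | r :: rs =>
              rs.foldl (fun b (x : List (Int × String)) => if x.length > b.length then x else b) r).map
            Prod.snd)) =
    (if (if (pvBFold ts).2.length > (pvBFold ts).1.length then (pvBFold ts).2 else (pvBFold ts).1) = []
     then content
     else PySem.Str.join " "
       (if (pvBFold ts).2.length > (pvBFold ts).1.length then (pvBFold ts).2 else (pvBFold ts).1)) := by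
  have hB : (if (pvBFold ts).2.length > (pvBFold ts).1.length then (pvBFold ts).2 else (pvBFold ts).1)
      = (pvBlocksAux [] ts).foldl pvPick [] := pvBfold_blocks ts [] []
  have hblocks := pvGa0_blocks ts 0
  cases hidx : pvFilt 0 ts with
  | nil =>
    rw [hidx] at hblocks
    simp only [pvGa0, List.map_nil] at hblocks
    rw [← hblocks, List.foldl_nil] at hB
    rw [hB]
    simp
  | cons first rest =>
    rw [hidx] at hblocks
    simp only [pvGa0] at hblocks
    have hA : (pvAFold first rest).1 ++ [(pvAFold first rest).2] = pvGaAux [] [first] first rest :=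
      pvFoldl_zip_ga rest first [] [first]
    have hrnil : (pvAFold first rest).1 ++ [(pvAFold first rest).2] ≠ [] := by simp
    obtain ⟨r, rs, hr⟩ := List.exists_cons_of_ne_nil hrnil
    rw [hr] at hA
    rw [← hA] at hblocks
    simp only [hr]
    -- first block is nonempty
    have hrne : r.map Prod.snd ≠ [] := by
      apply pvBlocksAux_ne_nil ts []
      rw [← hblocks]
      simp
    rw [← hblocks, List.map_cons, List.foldl_cons] at hB
    have hpick0 : pvPick [] (r.map Prod.snd) = r.map Prod.snd := by
      simp only [pvPick]
      rw [if_pos]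
      simpa [Nat.pos_iff_ne_zero, List.length_eq_zero_iff] using hrne
    rw [hpick0] at hB
    have hBne : ((rs.map (List.map Prod.snd)).foldl pvPick (r.map Prod.snd)) ≠ [] := by
      intro h
      have := pvFoldl_pick_length (rs.map (List.map Prod.snd)) (r.map Prod.snd)
      rw [h] at this
      simp only [List.length_nil, Nat.le_zero, List.length_eq_zero_iff] at this
      exact hrne this
    rw [hB, pvMap_foldl_pick rs r, if_neg hBne]

-- ===== VERDICT (by name: the statement is the Claim_ definition above) =====
set_option maxHeartbeats 2000000 in
theorem best_search_query_py_spec : Claim_equal_best_search_query_py := by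
  intro content _
  show best_search_query_py content = best_search_query_py_alt content
  exact pvCore content
    ((PySem.Str.split₀ (PySem.Str.lower content)).map (fun w => PySem.Str.stripChars w ".,!?;:\"'"))
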